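-- pv_equiv track=rewrite | github.com/mariabv/MariaVillafranca_labb321 | fikonsprak.py | fikonsprak
-- ===== SOURCE A (Python) =====
-- def fikonsprak(inrad):
-- 	vokaler = 'aouaeiyaoAOUaEIYao'
-- 	konsonanter = 'bcdfghjklmnpqrstvwxzBCDFGHJKLMNPQRSTVWXZ'
-- 	utr = ""
-- 	aa = []
-- 	for word in inrad.split():
-- 		bb = ""
-- 		nw = ""
-- 		log = True
-- 		for s in word:
-- 			if s in konsonanter and log:
-- 				bb += s
-- 			elif s in vokaler and log:
-- 				bb += s
-- 				log = False
-- 			else: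
-- 				nw += s
-- 		aa.append('fi'+nw+bb+'kon')
-- 	utr = ' '.join(aa)
-- 	return utr
-- ===== SOURCE B (Python) =====
-- def fikonsprak(inrad):
--     vowels = 'aoueiyAOUEIY'
--     cons = 'bcdfghjklmnpqrstvwxzBCDFGHJKLMNPQRSTVWXZ'
--
--     def encode(word):
--         i = next((k for k in range(len(word)) if word[k] in vowels), len(word))
--         pre = word[:i]
--         bb = ''.join(c for c in pre if c in cons) + word[i:i+1]
--         nw = ''.join(c for c in pre if c not in cons) + word[i+1:]
--         return 'fi' + nw + bb + 'kon'
--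
--     return ' '.join(encode(w) for w in inrad.split())
-- ===== Notes on version B (the rewrite author's own statement) =====
-- stated objective: alternative
-- what changed: Per word, B locates the first vowel's index and rebuilds bb/nw from slices and filters of the prefix, replacing A's stateful log-flag scan that classifies characters one by one.
import Mathlib
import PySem

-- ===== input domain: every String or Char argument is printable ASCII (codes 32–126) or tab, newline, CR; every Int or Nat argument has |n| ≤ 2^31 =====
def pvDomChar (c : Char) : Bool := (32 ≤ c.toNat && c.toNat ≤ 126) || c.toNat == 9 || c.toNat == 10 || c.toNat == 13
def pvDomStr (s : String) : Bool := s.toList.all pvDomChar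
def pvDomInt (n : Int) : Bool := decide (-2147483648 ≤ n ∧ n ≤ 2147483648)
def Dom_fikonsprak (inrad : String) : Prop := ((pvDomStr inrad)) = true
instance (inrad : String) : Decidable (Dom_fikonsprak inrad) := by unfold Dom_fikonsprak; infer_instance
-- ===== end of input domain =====

-- B recomputes each word from the index of its first vowel (slice + filters) instead of A's
-- stateful character-by-character scan; objective: alternative decomposition, same cost.

-- ===== PORT A =====
-- chars of the Python constant 'aouaeiyaoAOUaEIYao'
def fkVok : List Char := ['a','o','u','a','e','i','y','a','o','A','O','U','a','E','I','Y','a','o']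
-- chars of 'bcdfghjklmnpqrstvwxzBCDFGHJKLMNPQRSTVWXZ'
def fkKon : List Char :=
  ['b','c','d','f','g','h','j','k','l','m','n','p','q','r','s','t','v','w','x','z',
   'B','C','D','F','G','H','J','K','L','M','N','P','Q','R','S','T','V','W','X','Z']

-- A's inner loop body: state (bb, nw, log)
def fkStepA (st : List Char × List Char × Bool) (s : Char) : List Char × List Char × Bool :=
  if decide (s ∈ fkKon) && st.2.2 then (st.1 ++ [s], st.2.1, st.2.2)
  else if decide (s ∈ fkVok) && st.2.2 then (st.1 ++ [s], st.2.1, false)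
  else (st.1, st.2.1 ++ [s], st.2.2)

def fkWordA (word : List Char) : List Char :=
  let r := word.foldl fkStepA ([], [], true)
  ['f','i'] ++ r.2.1 ++ r.1 ++ ['k','o','n']

def fikonsprak (inrad : String) : String :=
  PySem.Str.join " "
    ((PySem.Str.split₀ inrad).foldl (fun aa w => aa ++ [String.ofList (fkWordA w.toList)]) [])

-- ===== PORT B =====
-- chars of 'aoueiyAOUEIY'
def fkVow : List Char := ['a','o','u','e','i','y','A','O','U','E','I','Y']
-- chars of 'bcdfghjklmnpqrstvwxzBCDFGHJKLMNPQRSTVWXZ'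
def fkCon : List Char :=
  ['b','c','d','f','g','h','j','k','l','m','n','p','q','r','s','t','v','w','x','z',
   'B','C','D','F','G','H','J','K','L','M','N','P','Q','R','S','T','V','W','X','Z']

-- encode(word): i = index of first vowel (len(word) if none); word[:i], word[i:i+1], word[i+1:]
def fkEncodeB (w : List Char) : List Char :=
  let i := (w.findIdx? (fun c => decide (c ∈ fkVow))).getD w.length
  let pre := w.take i
  let bb := pre.filter (fun c => decide (c ∈ fkCon)) ++ (w.drop i).take 1
  let nw := pre.filter (fun c => !decide (c ∈ fkCon)) ++ w.drop (i+1)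
  ['f','i'] ++ nw ++ bb ++ ['k','o','n']

def fikonsprak_alt (inrad : String) : String :=
  PySem.Str.join " " ((PySem.Str.split₀ inrad).map (fun w => String.ofList (fkEncodeB w.toList)))

-- ===== PRECONDITION & SPEC =====
def Spec_fikonsprak (inrad : String) (out : String) : Prop := out = fikonsprak_alt inrad
instance (inrad : String) (out : String) : Decidable (Spec_fikonsprak inrad out) := by unfold Spec_fikonsprak; infer_instance

-- ===== CLAIM (what is proved, stated in full; the proofs are below) =====
def Claim_equal_fikonsprak : Prop := ∀ (inrad : String), Dom_fikonsprak inrad → Spec_fikonsprak inrad (fikonsprak inrad)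

-- ===== LEMMAS AND PROOFS =====

-- the two vowel constants denote the same set of characters
theorem fk_mem_vok_iff (c : Char) : c ∈ fkVok ↔ c ∈ fkVow := by
  constructor <;> intro h <;> fin_cases h <;> decide

-- vowels and consonants are disjoint
theorem fk_vok_not_kon {c : Char} (h : c ∈ fkVok) : c ∉ fkKon := by
  fin_cases h <;> decide

-- index of the first vowel, A-side vowel constant
def fkIdx (w : List Char) : Nat :=
  (w.findIdx? (fun c => decide (c ∈ fkVok))).getD w.length

theorem fkIdx_cons_vow {c : Char} (w : List Char) (h : c ∈ fkVok) :
    fkIdx (c :: w) = 0 := by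
  simp [fkIdx, List.findIdx?_cons, h]

theorem fkIdx_cons_not_vow {c : Char} (w : List Char) (h : c ∉ fkVok) :
    fkIdx (c :: w) = fkIdx w + 1 := by
  simp only [fkIdx, List.findIdx?_cons, decide_eq_true_eq, if_neg h]
  cases hf : w.findIdx? (fun c => decide (c ∈ fkVok)) <;> simp [List.length_cons]

theorem fk_findIdx?_cons_not_vow {c : Char} (w : List Char) (h : c ∉ fkVok) :
    ((c :: w).findIdx? (fun c => decide (c ∈ fkVok))).isNone
      = (w.findIdx? (fun c => decide (c ∈ fkVok))).isNone := by
  simp [List.findIdx?_cons, h]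

-- with log False both guards are off
theorem fkStepA_false (bb nw : List Char) (c : Char) :
    fkStepA (bb, nw, false) c = (bb, nw ++ [c], false) := by
  simp [fkStepA]

-- once log is False every remaining character is appended to nw
theorem fk_loop_false (w : List Char) (bb nw : List Char) :
    w.foldl fkStepA (bb, nw, false) = (bb, nw ++ w, false) := by
  induction w generalizing nw with
  | nil => simp
  | cons c w ih => rw [List.foldl_cons, fkStepA_false, ih]; simp

-- characterization of A's scan while log is True
theorem fk_loop_true (w : List Char) (bb nw : List Char) :
    w.foldl fkStepA (bb, nw, true) =
      (bb ++ (w.take (fkIdx w)).filter (fun c => decide (c ∈ fkKon)) ++ (w.drop (fkIdx w)).take 1,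
       nw ++ (w.take (fkIdx w)).filter (fun c => !decide (c ∈ fkKon)) ++ w.drop (fkIdx w + 1),
       (w.findIdx? (fun c => decide (c ∈ fkVok))).isNone) := by
  induction w generalizing bb nw with
  | nil => simp [fkIdx]
  | cons c w ih =>
    by_cases hv : c ∈ fkVok
    · have hk : c ∉ fkKon := fk_vok_not_kon hv
      simp only [List.foldl_cons, fkStepA]
      rw [if_neg (by simp [hk]), if_pos (by simp [hv])]
      rw [fk_loop_false, fkIdx_cons_vow w hv]
      simp [List.findIdx?_cons, hv]
    · simp only [List.foldl_cons, fkStepA]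
      rw [fkIdx_cons_not_vow w hv, fk_findIdx?_cons_not_vow w hv]
      by_cases hk : c ∈ fkKon
      · rw [if_pos (by simp [hk])]
        rw [ih]
        simp [hk, List.append_assoc]
      · rw [if_neg (by simp [hk]), if_neg (by simp [hv])]
        rw [ih]
        simp [hk, List.append_assoc]

-- per-word agreement
theorem fk_word_eq (w : List Char) : fkWordA w = fkEncodeB w := by
  have hpred : (fun c => decide (c ∈ fkVow)) = (fun c => decide (c ∈ fkVok)) := by
    funext c; exact decide_eq_decide.mpr (fk_mem_vok_iff c).symm
  have hcon : fkCon = fkKon := rfl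
  unfold fkWordA fkEncodeB
  rw [fk_loop_true, hpred, hcon]
  simp [fkIdx]

theorem fikonsprak_spec : Claim_equal_fikonsprak := by
  intro inrad _
  show fikonsprak inrad = fikonsprak_alt inrad
  unfold fikonsprak fikonsprak_alt
  rw [PySem.List.foldl_append_singleton_eq_map]
  simp [fk_word_eq]
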